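-- pv_equiv track=rewrite | github.com/SimonDahdal/Personal_page | logic_processing.py | generate_html_list
-- ===== SOURCE A (Python) =====
-- def generate_html_list(entries):
--     """Generate an HTML list from a list of bib entries."""
--     list_items = []
--     for entry in entries:
--         authors = entry.get('author', 'No authors')
--         entry_type = entry.get('ENTRYTYPE', '').lower()
--         if entry_type == 'inproceedings':
--             list_items.append(
--                 f"<li>{entry.get('title','No title')} - {authors} - {entry.get('booktitle','Conference')} {entry.get('year','')}</li>"
--             )
--         elif entry_type == 'article':
--             list_items.append(
--                 f"<li>{entry.get('title','No title')} - {authors} - {entry.get('journal','Journal')} {entry.get('year','')}</li>"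
--             )
--         elif entry_type == 'misc':
--             list_items.append(
--                 f"<li>{entry.get('title','No title')} - {authors} - {entry.get('number','Patent number')} {entry.get('year','')}</li>"
--             )
--     return "<ul>\n" + "\n".join(list_items) + "\n</ul>"
-- ===== SOURCE B (Python) =====
-- FORMATS = {
--     'inproceedings': ('booktitle', 'Conference'),
--     'article': ('journal', 'Journal'),
--     'misc': ('number', 'Patent number'),
-- }
--
--
-- def _body(entries):
--     """Recursively render the newline-joined <li> items, back-to-front,
--     without building an intermediate list."""
--     if not entries:
--         return ""
--     entry = entries[0]
--     rest = _body(entries[1:])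
--     fmt = FORMATS.get(entry.get('ENTRYTYPE', '').lower())
--     if fmt is None:
--         return rest
--     field_key, default = fmt
--     item = (f"<li>{entry.get('title','No title')} - {entry.get('author','No authors')}"
--             f" - {entry.get(field_key, default)} {entry.get('year','')}</li>")
--     if rest == "":
--         return item
--     return item + "\n" + rest
--
--
-- def generate_html_list(entries):
--     """Generate an HTML list from a list of bib entries."""
--     return "<ul>\n" + _body(entries) + "\n</ul>"
-- ===== Notes on version B (the rewrite author's own statement) =====
-- stated objective: alternative
-- what changed: Replaces A's accumulate-a-list-then-join loop by a structural recursion that builds the joined item text directly back-to-front (no intermediate list, no join), and replaces the if/elif chain of three near-identical templates with a dispatch table and one uniform template.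
import Mathlib
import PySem

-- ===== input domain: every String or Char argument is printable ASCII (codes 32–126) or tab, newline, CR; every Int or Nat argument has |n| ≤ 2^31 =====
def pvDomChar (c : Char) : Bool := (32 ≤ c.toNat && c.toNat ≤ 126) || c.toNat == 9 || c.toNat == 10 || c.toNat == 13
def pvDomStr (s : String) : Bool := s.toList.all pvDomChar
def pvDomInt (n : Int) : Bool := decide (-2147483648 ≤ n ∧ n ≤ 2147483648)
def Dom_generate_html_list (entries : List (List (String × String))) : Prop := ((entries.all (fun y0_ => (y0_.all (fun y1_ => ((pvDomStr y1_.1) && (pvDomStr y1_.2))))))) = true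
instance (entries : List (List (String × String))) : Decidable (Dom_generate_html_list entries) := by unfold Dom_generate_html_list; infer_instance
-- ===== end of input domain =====

-- B replaces A's accumulate-a-list-then-join loop by a structural recursion that builds the joined
-- item text directly back-to-front (no intermediate list, no join), with a dispatch table and one
-- uniform template instead of the if/elif chain (alternative decomposition, same cost).

-- entry.get(k, d) on an association list: first match, else default
def pvGet (entry : List (String × String)) (k d : String) : String :=
  (entry.lookup k).getD d

-- ===== PORT A =====
def generate_html_list (entries : List (List (String × String))) : String :=
  let list_items := entries.foldl (fun acc entry =>
    let authors := pvGet entry "author" "No authors"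
    let entry_type := PySem.Str.lower (pvGet entry "ENTRYTYPE" "")
    if entry_type = "inproceedings" then
      acc ++ ["<li>" ++ pvGet entry "title" "No title" ++ " - " ++ authors ++ " - " ++
              pvGet entry "booktitle" "Conference" ++ " " ++ pvGet entry "year" "" ++ "</li>"]
    else if entry_type = "article" then
      acc ++ ["<li>" ++ pvGet entry "title" "No title" ++ " - " ++ authors ++ " - " ++
              pvGet entry "journal" "Journal" ++ " " ++ pvGet entry "year" "" ++ "</li>"]
    else if entry_type = "misc" then
      acc ++ ["<li>" ++ pvGet entry "title" "No title" ++ " - " ++ authors ++ " - " ++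
              pvGet entry "number" "Patent number" ++ " " ++ pvGet entry "year" "" ++ "</li>"]
    else acc) []
  "<ul>\n" ++ PySem.Str.join "\n" list_items ++ "\n</ul>"

-- ===== PORT B =====
def FORMATS : List (String × (String × String)) :=
  [("inproceedings", ("booktitle", "Conference")),
   ("article", ("journal", "Journal")),
   ("misc", ("number", "Patent number"))]

-- Source B's _body: structural recursion building the joined text back-to-front
def bodyB : List (List (String × String)) → String
  | [] => ""
  | entry :: rest0 =>
      let rest := bodyB rest0
      match FORMATS.lookup (PySem.Str.lower (pvGet entry "ENTRYTYPE" "")) with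
      | none => rest
      | some (field_key, dflt) =>
          let item := "<li>" ++ pvGet entry "title" "No title" ++ " - " ++
                      pvGet entry "author" "No authors" ++ " - " ++
                      pvGet entry field_key dflt ++ " " ++ pvGet entry "year" "" ++ "</li>"
          if rest = "" then item else item ++ "\n" ++ rest

def generate_html_list_alt (entries : List (List (String × String))) : String :=
  "<ul>\n" ++ bodyB entries ++ "\n</ul>"

-- ===== PRECONDITION & SPEC =====
def Spec_generate_html_list (entries : List (List (String × String))) (out : String) : Prop := out = generate_html_list_alt entries
instance (entries : List (List (String × String))) (out : String) : Decidable (Spec_generate_html_list entries out) := by unfold Spec_generate_html_list; infer_instance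

-- ===== CLAIM =====
def Claim_equal_generate_html_list : Prop := ∀ (entries : List (List (String × String))), Dom_generate_html_list entries → Spec_generate_html_list entries (generate_html_list entries)

-- ===== LEMMAS AND PROOFS =====

-- the uniform item B emits for one recognised entry
def fmtItem (entry : List (String × String)) (field_key dflt : String) : String :=
  "<li>" ++ pvGet entry "title" "No title" ++ " - " ++ pvGet entry "author" "No authors" ++
  " - " ++ pvGet entry field_key dflt ++ " " ++ pvGet entry "year" "" ++ "</li>"

-- the optional item per entry, shared characterisation of both programs
def fmtEntry (entry : List (String × String)) : Option String :=
  match FORMATS.lookup (PySem.Str.lower (pvGet entry "ENTRYTYPE" "")) with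
  | none => none
  | some (field_key, dflt) => some (fmtItem entry field_key dflt)

lemma fmtEntry_ne_empty (entry : List (String × String)) (s : String)
    (h : fmtEntry entry = some s) : s ≠ "" := by
  unfold fmtEntry at h
  rcases hl : FORMATS.lookup (PySem.Str.lower (pvGet entry "ENTRYTYPE" "")) with _ | ⟨k, d⟩ <;>
    rw [hl] at h
  · exact absurd h (by simp)
  · intro he
    have hsk : s = fmtItem entry k d := (Option.some.injEq _ _).mp h.symm
    have := congrArg String.toList (hsk ▸ he)
    simp [fmtItem, String.toList_append] at this

-- A's loop body for one entry appends exactly the optional item fmtEntry yields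
lemma body_eq (acc : List String) (entry : List (String × String)) :
    (let authors := pvGet entry "author" "No authors"
     let entry_type := PySem.Str.lower (pvGet entry "ENTRYTYPE" "")
     if entry_type = "inproceedings" then
       acc ++ ["<li>" ++ pvGet entry "title" "No title" ++ " - " ++ authors ++ " - " ++
               pvGet entry "booktitle" "Conference" ++ " " ++ pvGet entry "year" "" ++ "</li>"]
     else if entry_type = "article" then
       acc ++ ["<li>" ++ pvGet entry "title" "No title" ++ " - " ++ authors ++ " - " ++
               pvGet entry "journal" "Journal" ++ " " ++ pvGet entry "year" "" ++ "</li>"]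
     else if entry_type = "misc" then
       acc ++ ["<li>" ++ pvGet entry "title" "No title" ++ " - " ++ authors ++ " - " ++
               pvGet entry "number" "Patent number" ++ " " ++ pvGet entry "year" "" ++ "</li>"]
     else acc) = acc ++ (fmtEntry entry).toList := by
  simp only [fmtEntry, fmtItem, FORMATS]
  by_cases h1 : PySem.Str.lower (pvGet entry "ENTRYTYPE" "") = "inproceedings"
  · simp [h1, List.lookup]
  · by_cases h2 : PySem.Str.lower (pvGet entry "ENTRYTYPE" "") = "article"
    · simp [h2, List.lookup]
    · by_cases h3 : PySem.Str.lower (pvGet entry "ENTRYTYPE" "") = "misc"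
      · simp [h3, List.lookup]
      · have e1 : (PySem.Str.lower (pvGet entry "ENTRYTYPE" "") == "inproceedings") = false := by simp [h1]
        have e2 : (PySem.Str.lower (pvGet entry "ENTRYTYPE" "") == "article") = false := by simp [h2]
        have e3 : (PySem.Str.lower (pvGet entry "ENTRYTYPE" "") == "misc") = false := by simp [h3]
        simp [h1, h2, h3, List.lookup, e1, e2, e3]

-- A's accumulator loop collects exactly the fmtEntry items
lemma items_eq (entries : List (List (String × String))) (acc : List String) :
    entries.foldl (fun acc entry =>
      let authors := pvGet entry "author" "No authors"
      let entry_type := PySem.Str.lower (pvGet entry "ENTRYTYPE" "")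
      if entry_type = "inproceedings" then
        acc ++ ["<li>" ++ pvGet entry "title" "No title" ++ " - " ++ authors ++ " - " ++
                pvGet entry "booktitle" "Conference" ++ " " ++ pvGet entry "year" "" ++ "</li>"]
      else if entry_type = "article" then
        acc ++ ["<li>" ++ pvGet entry "title" "No title" ++ " - " ++ authors ++ " - " ++
                pvGet entry "journal" "Journal" ++ " " ++ pvGet entry "year" "" ++ "</li>"]
      else if entry_type = "misc" then
        acc ++ ["<li>" ++ pvGet entry "title" "No title" ++ " - " ++ authors ++ " - " ++
                pvGet entry "number" "Patent number" ++ " " ++ pvGet entry "year" "" ++ "</li>"]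
      else acc) acc = acc ++ entries.filterMap fmtEntry := by
  induction entries generalizing acc with
  | nil => simp
  | cons e es ih =>
    rw [List.foldl_cons, body_eq acc e, ih, List.filterMap_cons]
    cases fmtEntry e <;> simp

-- helper facts about "\n"-join, via the Chars layer
lemma join_one (s : String) : PySem.Str.join "\n" [s] = s := by
  rw [← String.toList_inj]; simp [PySem.Str.toList_join, PySem.Chars.join_singleton]

lemma join_two (s x : String) (xs : List String) :
    PySem.Str.join "\n" (s :: x :: xs) = s ++ "\n" ++ PySem.Str.join "\n" (x :: xs) := by
  rw [← String.toList_inj]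
  simp [PySem.Str.toList_join, PySem.Chars.join_cons_cons, String.toList_append]

lemma join_ne_empty (x : String) (xs : List String) (hx : x ≠ "") :
    PySem.Str.join "\n" (x :: xs) ≠ "" := by
  intro hj
  rcases xs with _ | ⟨y, ys⟩
  · rw [join_one] at hj; exact hx hj
  · rw [join_two] at hj
    have := congrArg String.toList hj
    rw [String.toList_append, String.toList_append] at this
    exact hx (by rw [← String.toList_inj]; simpa using (List.append_eq_nil_iff.mp (List.append_eq_nil_iff.mp this).1).1)

lemma mem_filterMap_fmt_ne_empty (es : List (List (String × String))) (x : String) (xs : List String)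
    (hes : es.filterMap fmtEntry = x :: xs) : x ≠ "" := by
  rcases List.filterMap_eq_cons_iff.mp hes with ⟨l1, e', l2, _, _, he', _⟩
  exact fmtEntry_ne_empty e' x he'

-- B's recursion computes the "\n"-join of the fmtEntry items
lemma bodyB_eq_join (entries : List (List (String × String))) :
    bodyB entries = PySem.Str.join "\n" (entries.filterMap fmtEntry) := by
  induction entries with
  | nil => simp [bodyB, PySem.Str.join]
  | cons e es ih =>
    rw [bodyB, List.filterMap_cons]
    rcases he : fmtEntry e with _ | s
    · have hl : FORMATS.lookup (PySem.Str.lower (pvGet e "ENTRYTYPE" "")) = none := by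
        unfold fmtEntry at he
        rcases h : FORMATS.lookup (PySem.Str.lower (pvGet e "ENTRYTYPE" "")) with _ | ⟨k, d⟩
        · rfl
        · rw [h] at he; exact absurd he (by simp)
      simp only [hl, ih]
    · obtain ⟨k, d, hl, hs⟩ : ∃ k d, FORMATS.lookup (PySem.Str.lower (pvGet e "ENTRYTYPE" "")) = some (k, d) ∧ s = fmtItem e k d := by
        unfold fmtEntry at he
        rcases h : FORMATS.lookup (PySem.Str.lower (pvGet e "ENTRYTYPE" "")) with _ | ⟨k', d'⟩ <;> rw [h] at he
        · exact absurd he (by simp)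
        · exact ⟨k', d', rfl, ((Option.some.injEq _ _).mp he).symm⟩
      simp only [hl, ih, hs, fmtItem]
      rcases hes : es.filterMap fmtEntry with _ | ⟨x, xs⟩
      · rw [join_one]
        simp [PySem.Str.join]
      · rw [join_two, if_neg (join_ne_empty x xs (mem_filterMap_fmt_ne_empty es x xs hes))]

-- ===== VERDICT =====
theorem generate_html_list_spec : Claim_equal_generate_html_list := by
  intro entries _
  show generate_html_list entries = generate_html_list_alt entries
  rw [generate_html_list, generate_html_list_alt, items_eq entries [], bodyB_eq_join]
  simp
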